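-- pv_equiv track=rewrite | github.com/MarcTheSpark/scamp_extensions | misc/junk/barlicityMessy.py | flatten_beat_groups
-- ===== SOURCE A (Python) =====
-- def flatten_beat_groups(beat_groups):
--     out = []
--     # first big beats
--     for sub_group in beat_groups:
--         out.append(sub_group.pop(0))
--     # then the pickups to those beats
--     for sub_group in beat_groups:
--         if len(sub_group) > 0:
--             out.append(sub_group.pop(0))
--     # then by the longest chain, and secondarily by order (big beat indispensability)
--     while True:
--         max_subgroup_length = max(len(sub_group) for sub_group in beat_groups)
--         if max_subgroup_length == 0:
--             break
--         else:
--             for sub_group in beat_groups: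
--                 if len(sub_group) == max_subgroup_length:
--                     out.append(sub_group.pop(0))
--                     break
--     return out
-- ===== SOURCE B (Python) =====
-- def flatten_beat_groups(beat_groups):
--     # Non-mutating re-implementation (A empties the sub-lists in place; the
--     # equivalence claimed is about the return value only): instead of repeatedly
--     # rescanning all groups for the longest one, read the tail elements off by
--     # their remaining-length key k, descending, in group order.
--     out = [g[0] for g in beat_groups]
--     out += [g[1] for g in beat_groups if len(g) > 1]
--     max_rem = max(len(g) - 2 for g in beat_groups)
--     for k in range(max_rem, 0, -1):
--         out += [g[len(g) - k] for g in beat_groups if len(g) - 2 >= k]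
--     return out
-- ===== Notes on version B (the rewrite author's own statement) =====
-- stated objective: faster
-- what changed: A repeatedly rescans all groups for the current maximum chain length and pops one element per scan (and empties the input lists in place); B computes each element's remaining-length key directly and emits the tails key-major by descending key in one pass per key, with no mutation and no per-element rescan.
-- outside the precondition, e.g. on flatten_beat_groups([]): A raises ValueError, B raises ValueError; on flatten_beat_groups([[1], []]): A raises IndexError, B raises IndexError
import Mathlib
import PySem

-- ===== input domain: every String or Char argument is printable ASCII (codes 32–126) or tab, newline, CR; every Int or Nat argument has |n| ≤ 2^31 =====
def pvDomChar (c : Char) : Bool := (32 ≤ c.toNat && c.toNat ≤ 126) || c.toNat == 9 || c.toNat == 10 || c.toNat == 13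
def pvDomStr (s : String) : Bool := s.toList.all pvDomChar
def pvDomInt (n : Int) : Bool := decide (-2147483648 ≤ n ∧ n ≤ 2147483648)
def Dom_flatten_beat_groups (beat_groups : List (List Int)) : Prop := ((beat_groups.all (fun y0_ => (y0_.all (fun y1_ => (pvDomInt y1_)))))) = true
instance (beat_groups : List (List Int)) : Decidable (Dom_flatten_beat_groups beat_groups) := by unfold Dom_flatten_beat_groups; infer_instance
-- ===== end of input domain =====

-- B replaces A's repeated rescan-for-the-longest-chain while-loop by reading the tail
-- elements off directly by their remaining-length key, descending (objective: faster).
-- A empties the sub-lists in place; B does not mutate: the equivalence claimed is about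
-- the return value only.

-- ===== PORT A =====

-- 'max(len(sub_group) for sub_group in beat_groups)'; the .getD 0 default is only
-- reached when beat_groups == [] (outside Pre_, where Python raises ValueError)
def fbgMaxLen (gs : List (List Int)) : Int :=
  (PySem.List.max? (gs.map (fun g => (g.length : Int))) (fun x => x)).getD 0

-- the inner 'for sub_group in beat_groups: if len == max: out.append(sub_group.pop(0)); break':
-- returns the appended element(s) and the groups after the one pop
def fbgPopMax : List (List Int) → Int → List Int × List (List Int)
  | [], _ => ([], [])
  | g :: rest, m =>
    if (g.length : Int) = m then ([g.headD 0], g.tail :: rest)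
    else
      let r := fbgPopMax rest m
      (r.1, g :: r.2)

def fbgSum (gs : List (List Int)) : Nat := (gs.map List.length).sum

-- termination helpers for the while-loop
theorem fbg_max_witness (gs : List (List Int)) (h : fbgMaxLen gs ≠ 0) :
    ∃ g ∈ gs, (g.length : Int) = fbgMaxLen gs := by
  cases hm : PySem.List.max? (gs.map (fun g => (g.length : Int))) (fun x => x) with
  | none =>
    exfalso; apply h
    unfold fbgMaxLen
    rw [hm]; rfl
  | some m =>
    have hmem := PySem.List.max?_mem hm
    rcases List.mem_map.1 hmem with ⟨g, hg, hgl⟩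
    exact ⟨g, hg, by unfold fbgMaxLen; rw [hm]; simpa using hgl⟩

theorem fbg_popMax_sum_lt : ∀ (gs : List (List Int)) (m : Int), m ≠ 0 →
    (∃ g ∈ gs, (g.length : Int) = m) → fbgSum (fbgPopMax gs m).2 < fbgSum gs := by
  intro gs
  induction gs with
  | nil => intro m _ hw; simp at hw
  | cons g rest ih =>
    intro m hm hw
    by_cases hg : (g.length : Int) = m
    · have hne : g ≠ [] := by
        intro he; subst he; simp at hg; omega
      simp only [fbgPopMax, if_pos hg, fbgSum, List.map_cons, List.sum_cons]
      have : g.tail.length < g.length := by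
        rw [List.length_tail]
        cases g with
        | nil => exact absurd rfl hne
        | cons a t => simp
      omega
    · rcases hw with ⟨w, hwmem, hwlen⟩
      have hwrest : w ∈ rest := by
        rcases List.mem_cons.1 hwmem with h | h
        · exfalso; apply hg; rw [← h]; exact hwlen
        · exact h
      have := ih m hm ⟨w, hwrest, hwlen⟩
      simp only [fbgPopMax, if_neg hg, fbgSum, List.map_cons, List.sum_cons]
      simp only [fbgSum] at this
      omega

-- the 'while True: … max … pop … break' loop
def fbgLoop (gs : List (List Int)) (out : List Int) : List Int :=
  if h : fbgMaxLen gs = 0 then out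
  else
    fbgLoop (fbgPopMax gs (fbgMaxLen gs)).2 (out ++ (fbgPopMax gs (fbgMaxLen gs)).1)
termination_by fbgSum gs
decreasing_by exact fbg_popMax_sum_lt gs (fbgMaxLen gs) h (fbg_max_witness gs h)

def flatten_beat_groups (beat_groups : List (List Int)) : List Int :=
  -- first big beats: 'out.append(sub_group.pop(0))'; headD's default is only reached on
  -- an empty sub_group (outside Pre_, where Python raises IndexError)
  let out1 := beat_groups.foldl (fun out g => out ++ [g.headD 0]) []
  let gs1 := beat_groups.map List.tail          -- effect of the pop(0)s on the groups
  -- then the pickups: 'if len(sub_group) > 0: out.append(sub_group.pop(0))'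
  let out2 := gs1.foldl (fun out g => if 0 < g.length then out ++ [g.headD 0] else out) out1
  let gs2 := gs1.map List.tail                  -- pop only when nonempty; tail [] = [] is that no-op
  fbgLoop gs2 out2

-- ===== PORT B =====
def flatten_beat_groups_alt (beat_groups : List (List Int)) : List Int :=
  -- '[g[0] for g in beat_groups]'; g nonempty under Pre_
  let out1 := beat_groups.map (fun g => g.headD 0)
  -- '[g[1] for g in beat_groups if len(g) > 1]'
  let out2 := out1 ++ (beat_groups.filter (fun g => decide (1 < g.length))).map (fun g => g.getD 1 0)
  -- 'max(len(g) - 2 for g in beat_groups)'; .getD 0 only reached when beat_groups == []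
  let maxRem := (PySem.List.max? (beat_groups.map (fun g => (g.length : Int) - 2)) (fun x => x)).getD 0
  -- 'for k in range(max_rem, 0, -1): out += [g[len(g) - k] for g in beat_groups if len(g) - 2 >= k]'
  -- the index len(g) - k is in range for every g the filter keeps (1 ≤ k ≤ len(g) - 2)
  (PySem.List.pyRange maxRem 0 (-1)).foldl
    (fun out k =>
      out ++ (beat_groups.filter (fun g => decide (k ≤ (g.length : Int) - 2))).map
        (fun g => g.getD (g.length - k.toNat) 0)) out2

-- ===== PRECONDITION & SPEC =====
-- Pre_ excludes exactly the inputs where Python A raises: an empty beat_groups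
-- (ValueError from max() on an empty generator) and any empty sub-group
-- (IndexError from sub_group.pop(0)); B raises on exactly the same inputs.
def Pre_flatten_beat_groups (beat_groups : List (List Int)) : Prop :=
  beat_groups ≠ [] ∧ ∀ g ∈ beat_groups, g ≠ []
instance (beat_groups : List (List Int)) : Decidable (Pre_flatten_beat_groups beat_groups) := by
  unfold Pre_flatten_beat_groups; infer_instance
def pvWitness_flatten_beat_groups : List (List Int) := [[1, 2, 3, 4], [5], [6, 7]]
def Spec_flatten_beat_groups (beat_groups : List (List Int)) (out : List Int) : Prop := out = flatten_beat_groups_alt beat_groups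
instance (beat_groups : List (List Int)) (out : List Int) : Decidable (Spec_flatten_beat_groups beat_groups out) := by unfold Spec_flatten_beat_groups; infer_instance

-- ===== CLAIM (what is proved, stated in full; the proofs are below) =====
def Claim_equal_flatten_beat_groups : Prop := ∀ (beat_groups : List (List Int)), Dom_flatten_beat_groups beat_groups → Pre_flatten_beat_groups beat_groups → Spec_flatten_beat_groups beat_groups (flatten_beat_groups beat_groups)

-- ===== LEMMAS AND PROOFS =====

-- key-major reading of phase 3: rowN k lists, in group order, the element each
-- chain yields at remaining-length key k; rowsN runs the keys downward
def rowN (k : Nat) (gs : List (List Int)) : List Int :=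
  (gs.filter (fun g => decide (k ≤ g.length))).map (fun g => g.getD (g.length - k) 0)

def rowsN : Nat → List (List Int) → List Int
  | 0, _ => []
  | k + 1, gs => rowN (k + 1) gs ++ rowsN k gs

-- one whole round of A's while-loop at max m: every chain of length m pops once
def stepAll (m : Int) (gs : List (List Int)) : List (List Int) :=
  gs.map (fun g => if (g.length : Int) = m then g.tail else g)

def rowEq (m : Int) (gs : List (List Int)) : List Int :=
  (gs.filter (fun g => decide ((g.length : Int) = m))).map (fun g => g.headD 0)

def countM (m : Int) (gs : List (List Int)) : Nat :=
  (gs.filter (fun g => decide ((g.length : Int) = m))).length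

theorem getD_zero_eq_headD (g : List Int) (d : Int) : g.getD 0 d = g.headD d := by
  cases g <;> rfl

theorem getD_tail (g : List Int) (i : Nat) (d : Int) : g.tail.getD i d = g.getD (i + 1) d := by
  cases g <;> rfl

theorem le_fbgMaxLen {gs : List (List Int)} {g : List Int} (h : g ∈ gs) :
    (g.length : Int) ≤ fbgMaxLen gs := by
  cases hm : PySem.List.max? (gs.map (fun g => (g.length : Int))) (fun x => x) with
  | none =>
    have := (PySem.List.max?_eq_none_iff _ _).1 hm
    simp at this
    exact absurd h (by simp [this])
  | some m =>
    have := PySem.List.max?_isMax hm ((g.length : Int)) (List.mem_map_of_mem h)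
    unfold fbgMaxLen; rw [hm]; simpa using this

theorem fbgMaxLen_eq {gs : List (List Int)} {m : Int}
    (hw : ∃ g ∈ gs, (g.length : Int) = m) (hb : ∀ g ∈ gs, (g.length : Int) ≤ m) :
    fbgMaxLen gs = m := by
  rcases hw with ⟨g, hg, hgl⟩
  have h1 : (g.length : Int) ≤ fbgMaxLen gs := le_fbgMaxLen hg
  have h2 : fbgMaxLen gs ≤ m := by
    cases hm : PySem.List.max? (gs.map (fun g => (g.length : Int))) (fun x => x) with
    | none =>
      have := (PySem.List.max?_eq_none_iff _ _).1 hm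
      simp at this
      exact absurd hg (by simp [this])
    | some m0 =>
      have hmem := PySem.List.max?_mem hm
      rcases List.mem_map.1 hmem with ⟨g', hg', hgl'⟩
      unfold fbgMaxLen; rw [hm]
      simpa [hgl'] using hb g' hg'
  omega

theorem popMax_facts : ∀ (gs : List (List Int)) (m : Int), m ≠ 0 →
    (∃ g ∈ gs, (g.length : Int) = m) →
    (fbgPopMax gs m).1 ++ rowEq m (fbgPopMax gs m).2 = rowEq m gs
    ∧ stepAll m (fbgPopMax gs m).2 = stepAll m gs
    ∧ countM m (fbgPopMax gs m).2 + 1 = countM m gs := by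
  intro gs
  induction gs with
  | nil => intro m _ hw; simp at hw
  | cons g rest ih =>
    intro m hm hw
    by_cases hg : (g.length : Int) = m
    · have hne : g ≠ [] := by intro he; subst he; simp at hg; omega
      have htail : ((g.length - 1 : Nat) : Int) ≠ m := by
        cases g with
        | nil => exact absurd rfl hne
        | cons a t => push_cast at hg ⊢; omega
      refine ⟨?_, ?_, ?_⟩
      · simp [fbgPopMax, if_pos hg, rowEq, List.filter_cons, hg, htail]
      · simp [fbgPopMax, if_pos hg, stepAll, List.map_cons, hg, htail]
      · simp [fbgPopMax, if_pos hg, countM, List.filter_cons, hg, htail]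
    · rcases hw with ⟨w, hwmem, hwlen⟩
      have hwrest : w ∈ rest := by
        rcases List.mem_cons.1 hwmem with h | h
        · exact absurd (h ▸ hwlen) hg
        · exact h
      rcases ih m hm ⟨w, hwrest, hwlen⟩ with ⟨f1, f2, f3⟩
      refine ⟨?_, ?_, ?_⟩
      · simpa [fbgPopMax, if_neg hg, rowEq, List.filter_cons, hg] using f1
      · simpa [fbgPopMax, if_neg hg, stepAll, List.map_cons, if_neg hg] using f2
      · simpa [fbgPopMax, if_neg hg, countM, List.filter_cons, hg] using f3

theorem popMax_len_le : ∀ (gs : List (List Int)) (m : Int),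
    (∀ g ∈ gs, (g.length : Int) ≤ m) →
    ∀ h ∈ (fbgPopMax gs m).2, (h.length : Int) ≤ m := by
  intro gs
  induction gs with
  | nil => intro m _ h hh; simp [fbgPopMax] at hh
  | cons g rest ih =>
    intro m hb h hh
    by_cases hg : (g.length : Int) = m
    · simp only [fbgPopMax, if_pos hg] at hh
      rcases List.mem_cons.1 hh with he | he
      · subst he; rw [List.length_tail]
        have := hb g (by simp)
        push_cast; omega
      · exact hb h (by simp [he])
    · simp only [fbgPopMax, if_neg hg] at hh
      rcases List.mem_cons.1 hh with he | he
      · exact hb h (by simp [he])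
      · exact ih m (fun g' hg' => hb g' (by simp [hg'])) h he

theorem round_lemma : ∀ (c : Nat) (gs : List (List Int)) (out : List Int) (m : Int),
    fbgMaxLen gs = m → m ≠ 0 → countM m gs = c + 1 →
    fbgLoop gs out = fbgLoop (stepAll m gs) (out ++ rowEq m gs) := by
  intro c
  induction c with
  | zero =>
    intro gs out m hmax hm hcount
    have hw : ∃ g ∈ gs, (g.length : Int) = m := by
      have hlen : 0 < (gs.filter (fun g => decide ((g.length : Int) = m))).length := by
        have : countM m gs = 1 := hcount
        unfold countM at this; omega
      rcases List.exists_mem_of_length_pos hlen with ⟨g, hgf⟩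
      rcases List.mem_filter.1 hgf with ⟨hg, hp⟩
      exact ⟨g, hg, by simpa using hp⟩
    rcases popMax_facts gs m hm hw with ⟨f1, f2, f3⟩
    have hc0 : countM m (fbgPopMax gs m).2 = 0 := by omega
    have hfil : (fbgPopMax gs m).2.filter (fun g => decide ((g.length : Int) = m)) = [] := by
      unfold countM at hc0
      exact List.length_eq_zero_iff.1 hc0
    have hrow0 : rowEq m (fbgPopMax gs m).2 = [] := by
      unfold rowEq; rw [hfil]; rfl
    have hstep : stepAll m (fbgPopMax gs m).2 = (fbgPopMax gs m).2 := by
      unfold stepAll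
      conv_rhs => rw [← List.map_id ((fbgPopMax gs m).2)]
      apply List.map_congr_left
      intro g hg
      have := List.filter_eq_nil_iff.1 hfil g hg
      simp at this
      exact if_neg this
    have hgs' : (fbgPopMax gs m).2 = stepAll m gs := by rw [← f2, hstep]
    have ho : (fbgPopMax gs m).1 = rowEq m gs := by
      rw [← f1, hrow0, List.append_nil]
    rw [fbgLoop, dif_neg (by rw [hmax]; exact hm), hmax, hgs', ho]
  | succ c' ih =>
    intro gs out m hmax hm hcount
    have hw : ∃ g ∈ gs, (g.length : Int) = m := by
      have hlen : 0 < (gs.filter (fun g => decide ((g.length : Int) = m))).length := by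
        unfold countM at hcount; omega
      rcases List.exists_mem_of_length_pos hlen with ⟨g, hgf⟩
      rcases List.mem_filter.1 hgf with ⟨hg, hp⟩
      exact ⟨g, hg, by simpa using hp⟩
    rcases popMax_facts gs m hm hw with ⟨f1, f2, f3⟩
    have hc' : countM m (fbgPopMax gs m).2 = c' + 1 := by omega
    have hw' : ∃ g ∈ (fbgPopMax gs m).2, (g.length : Int) = m := by
      have hlen : 0 < ((fbgPopMax gs m).2.filter (fun g => decide ((g.length : Int) = m))).length := by
        unfold countM at hc'; omega
      rcases List.exists_mem_of_length_pos hlen with ⟨g, hgf⟩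
      rcases List.mem_filter.1 hgf with ⟨hg, hp⟩
      exact ⟨g, hg, by simpa using hp⟩
    have hb : ∀ g ∈ gs, (g.length : Int) ≤ m := by
      intro g hg; rw [← hmax]; exact le_fbgMaxLen hg
    have hmax' : fbgMaxLen (fbgPopMax gs m).2 = m :=
      fbgMaxLen_eq hw' (popMax_len_le gs m hb)
    rw [fbgLoop, dif_neg (by rw [hmax]; exact hm), hmax,
      ih (fbgPopMax gs m).2 (out ++ (fbgPopMax gs m).1) m hmax' hm hc', f2,
      List.append_assoc, f1]

theorem rowN_empty {gs : List (List Int)} {n : Nat}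
    (hb : ∀ g ∈ gs, g.length ≤ n) : rowN (n + 1) gs = [] := by
  unfold rowN
  have : gs.filter (fun g => decide (n + 1 ≤ g.length)) = [] := by
    apply List.filter_eq_nil_iff.2
    intro g hg
    have := hb g hg
    simp; omega
  rw [this]; rfl

theorem rowsN_zero_all {gs : List (List Int)}
    (hz : ∀ g ∈ gs, g.length = 0) : ∀ n, rowsN n gs = [] := by
  intro n
  induction n with
  | zero => rfl
  | succ k ih =>
    show rowN (k + 1) gs ++ rowsN k gs = []
    rw [ih, rowN_empty (fun g hg => by rw [hz g hg]; omega), List.append_nil]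

theorem rowN_stepAll {gs : List (List Int)} {n k : Nat} (hk : k + 1 ≤ n)
    (hb : ∀ g ∈ gs, g.length ≤ n + 1) :
    rowN (k + 1) (stepAll ((n : Int) + 1) gs) = rowN (k + 1) gs := by
  unfold rowN stepAll
  rw [List.filter_map, List.map_map]
  have hfil : gs.filter ((fun g => decide (k + 1 ≤ g.length)) ∘
      (fun g => if (g.length : Int) = (n : Int) + 1 then g.tail else g)) =
      gs.filter (fun g => decide (k + 1 ≤ g.length)) := by
    apply List.filter_congr
    intro g hg
    by_cases hc : (g.length : Int) = (n : Int) + 1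
    · have hlen : g.length = n + 1 := by omega
      simp only [Function.comp, if_pos hc, List.length_tail, hlen]
      simp; omega
    · simp only [Function.comp, if_neg hc]
  rw [hfil]
  apply List.map_congr_left
  intro g hg
  rcases List.mem_filter.1 hg with ⟨hgm, hp⟩
  have hglen : k + 1 ≤ g.length := by simpa using hp
  by_cases hc : (g.length : Int) = (n : Int) + 1
  · have hlen : g.length = n + 1 := by omega
    simp only [Function.comp, if_pos hc]
    rw [getD_tail, List.length_tail, hlen]
    congr 1
    omega
  · simp only [Function.comp, if_neg hc]

theorem rowsN_stepAll {gs : List (List Int)} {n : Nat}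
    (hb : ∀ g ∈ gs, g.length ≤ n + 1) :
    ∀ k, k ≤ n → rowsN k (stepAll ((n : Int) + 1) gs) = rowsN k gs := by
  intro k
  induction k with
  | zero => intro _; rfl
  | succ k' ih =>
    intro hk
    show rowN (k' + 1) _ ++ rowsN k' _ = rowN (k' + 1) gs ++ rowsN k' gs
    rw [rowN_stepAll hk hb, ih (by omega)]

theorem rowEq_top {gs : List (List Int)} {n : Nat}
    (hb : ∀ g ∈ gs, g.length ≤ n + 1) :
    rowEq ((n : Int) + 1) gs = rowN (n + 1) gs := by
  unfold rowEq rowN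
  have hfil : gs.filter (fun g => decide ((g.length : Int) = (n : Int) + 1)) =
      gs.filter (fun g => decide (n + 1 ≤ g.length)) := by
    apply List.filter_congr
    intro g hg
    have := hb g hg
    simp; omega
  rw [hfil]
  apply List.map_congr_left
  intro g hg
  rcases List.mem_filter.1 hg with ⟨hgm, hp⟩
  have hglen : g.length = n + 1 := by
    have h1 : n + 1 ≤ g.length := by simpa using hp
    have h2 := hb g hgm
    omega
  rw [hglen, Nat.sub_self, getD_zero_eq_headD]

theorem loop_rows : ∀ (n : Nat) (gs : List (List Int)) (out : List Int),
    (∀ g ∈ gs, g.length ≤ n) → fbgLoop gs out = out ++ rowsN n gs := by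
  intro n
  induction n with
  | zero =>
    intro gs out hb
    have h0 : fbgMaxLen gs = 0 := by
      cases gs with
      | nil => rfl
      | cons g rest =>
        exact fbgMaxLen_eq ⟨g, by simp, by have := hb g (by simp); omega⟩
          (fun g' hg' => by have := hb g' hg'; omega)
    rw [fbgLoop, dif_pos h0]
    show out = out ++ ([] : List Int)
    rw [List.append_nil]
  | succ n ih =>
    intro gs out hb
    by_cases h0 : fbgMaxLen gs = 0
    · have hz : ∀ g ∈ gs, g.length = 0 := by
        intro g hg
        have := le_fbgMaxLen hg
        rw [h0] at this
        omega
      rw [fbgLoop, dif_pos h0, rowsN_zero_all hz, List.append_nil]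
    · by_cases hmx : fbgMaxLen gs = (n : Int) + 1
      · have hwit := fbg_max_witness gs h0
        have hcpos : 0 < countM ((n : Int) + 1) gs := by
          rcases hwit with ⟨g, hg, hgl⟩
          rw [hmx] at hgl
          unfold countM
          apply List.length_pos_iff.2
          intro hnil
          have := List.filter_eq_nil_iff.1 hnil g hg
          simp [hgl] at this
        rcases Nat.exists_eq_add_of_lt hcpos with ⟨c, hc⟩
        rw [round_lemma c gs out ((n : Int) + 1) hmx (by omega) (by omega)]
        have hbs : ∀ g ∈ stepAll ((n : Int) + 1) gs, g.length ≤ n := by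
          intro g hg
          rcases List.mem_map.1 hg with ⟨g', hg', rfl⟩
          by_cases hc' : ((g'.length : Int) = (n : Int) + 1)
          · rw [if_pos hc', List.length_tail]; omega
          · rw [if_neg hc']
            have := hb g' hg'
            omega
        rw [ih _ _ hbs, rowsN_stepAll hb n (le_refl n), rowEq_top hb, List.append_assoc]
        rfl
      · have hmle : fbgMaxLen gs ≤ (n : Int) := by
          rcases fbg_max_witness gs h0 with ⟨g, hg, hgl⟩
          have := hb g hg
          omega
        have hb' : ∀ g ∈ gs, g.length ≤ n := by
          intro g hg
          have h1 := le_fbgMaxLen hg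
          omega
        rw [ih gs out hb']
        show out ++ rowsN n gs = out ++ (rowN (n + 1) gs ++ rowsN n gs)
        rw [rowN_empty hb']
        rfl

-- phases 1 and 2: A's append-folds equal B's map / filter-map
theorem out2_eq (bg : List (List Int)) :
    (bg.map List.tail).foldl (fun out g => if 0 < g.length then out ++ [g.headD 0] else out)
      (bg.foldl (fun out g => out ++ [g.headD 0]) [])
    = (bg.map (fun g => g.headD 0)) ++
      (bg.filter (fun g => decide (1 < g.length))).map (fun g => g.getD 1 0) := by
  rw [PySem.List.foldl_append_singleton_eq_map, PySem.List.foldl_append_ite,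
    List.nil_append, List.filter_map, List.map_map]
  congr 1
  have hfil : bg.filter ((fun g => decide (0 < g.length)) ∘ List.tail) =
      bg.filter (fun g => decide (1 < g.length)) := by
    apply List.filter_congr
    intro g _
    simp [Function.comp, List.length_tail]
  rw [hfil]
  apply List.map_congr_left
  intro g _
  show g.tail.headD 0 = g.getD 1 0
  rw [← getD_zero_eq_headD, getD_tail]

theorem le_maxD {xs : List Int} {x : Int} (h : x ∈ xs) :
    x ≤ (PySem.List.max? xs (fun y => y)).getD 0 := by
  cases hm : PySem.List.max? xs (fun y => y) with
  | none =>
    have := (PySem.List.max?_eq_none_iff xs (fun y => y)).1 hm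
    subst this
    simp at h
  | some m =>
    simpa using PySem.List.max?_isMax hm x h

-- B's descending-k loop, read off one key at a time
def rowB (bg : List (List Int)) (k : Int) : List Int :=
  (bg.filter (fun g => decide (k ≤ (g.length : Int) - 2))).map
    (fun g => g.getD (g.length - k.toNat) 0)

def rowsB (bg : List (List Int)) : Nat → List Int
  | 0 => []
  | k + 1 => rowB bg ((k : Int) + 1) ++ rowsB bg k

theorem fold_pyRange (bg : List (List Int)) : ∀ (n : Nat) (out : List Int),
    (PySem.List.pyRange (n : Int) 0 (-1)).foldl
      (fun out k =>
        out ++ (bg.filter (fun g => decide (k ≤ (g.length : Int) - 2))).map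
          (fun g => g.getD (g.length - k.toNat) 0)) out
    = out ++ rowsB bg n := by
  intro n
  induction n with
  | zero =>
    intro out
    rw [PySem.List.pyRange_neg_one_eq_nil (by omega)]
    show out = out ++ ([] : List Int)
    rw [List.append_nil]
  | succ m ih =>
    intro out
    rw [PySem.List.pyRange_neg_one_cons (by push_cast; omega)]
    have hstep : ((m + 1 : Nat) : Int) - 1 = (m : Int) := by push_cast; omega
    rw [List.foldl_cons, hstep, ih]
    show (out ++ rowB bg ((m + 1 : Nat) : Int)) ++ rowsB bg m =
      out ++ (rowB bg ((m : Int) + 1) ++ rowsB bg m)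
    rw [List.append_assoc]
    norm_cast


theorem rowB_eq_rowN (bg : List (List Int)) (k : Nat) :
    rowB bg ((k : Int) + 1) = rowN (k + 1) (bg.map (fun g => g.tail.tail)) := by
  unfold rowB rowN
  rw [List.filter_map, List.map_map]
  have hfil : bg.filter ((fun g => decide (k + 1 ≤ g.length)) ∘ (fun g => g.tail.tail)) =
      bg.filter (fun g => decide ((k : Int) + 1 ≤ (g.length : Int) - 2)) := by
    apply List.filter_congr
    intro g _
    simp [Function.comp, List.length_tail]
    omega
  rw [← hfil]
  apply List.map_congr_left
  intro g hg
  rcases List.mem_filter.1 hg with ⟨hgm, hp⟩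
  have hglen : k + 3 ≤ g.length := by
    simp [Function.comp, List.length_tail] at hp
    omega
  show g.getD (g.length - ((k : Int) + 1).toNat) 0 =
    g.tail.tail.getD (g.tail.tail.length - (k + 1)) 0
  rw [getD_tail, getD_tail, List.length_tail, List.length_tail]
  congr 1
  have : ((k : Int) + 1).toNat = k + 1 := by omega
  rw [this]
  omega

theorem rowsB_eq_rowsN (bg : List (List Int)) : ∀ n,
    rowsB bg n = rowsN n (bg.map (fun g => g.tail.tail)) := by
  intro n
  induction n with
  | zero => rfl
  | succ k ih =>
    show rowB bg ((k : Int) + 1) ++ rowsB bg k =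
      rowN (k + 1) _ ++ rowsN k _
    rw [rowB_eq_rowN, ih]

-- ===== VERDICT (by name: the statement is the Claim_ definition above) =====
theorem flatten_beat_groups_spec : Claim_equal_flatten_beat_groups := by
  intro bg _ _
  unfold Spec_flatten_beat_groups
  simp only [flatten_beat_groups, flatten_beat_groups_alt]
  rw [out2_eq bg]
  have hmaps : (bg.map List.tail).map List.tail = bg.map (fun g => g.tail.tail) := by
    rw [List.map_map]; rfl
  rw [hmaps]
  have hbound : ∀ g ∈ bg.map (fun g => g.tail.tail), g.length ≤
      ((PySem.List.max? (bg.map (fun g => (g.length : Int) - 2)) (fun x => x)).getD 0).toNat := by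
    intro g hg
    rcases List.mem_map.1 hg with ⟨g', hg', rfl⟩
    have hle : (g'.length : Int) - 2 ≤
        (PySem.List.max? (bg.map (fun g => (g.length : Int) - 2)) (fun x => x)).getD 0 :=
      le_maxD (List.mem_map_of_mem hg')
    rw [List.length_tail, List.length_tail]
    omega
  rw [loop_rows _ _ _ hbound]
  by_cases hpos : 0 < (PySem.List.max? (bg.map (fun g => (g.length : Int) - 2)) (fun x => x)).getD 0
  · rw [show (PySem.List.max? (bg.map (fun g => (g.length : Int) - 2)) (fun x => x)).getD 0 =
        (((PySem.List.max? (bg.map (fun g => (g.length : Int) - 2)) (fun x => x)).getD 0).toNat : Int)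
      from by omega]
    rw [fold_pyRange bg, rowsB_eq_rowsN]
    rw [Int.toNat_natCast]
  · rw [PySem.List.pyRange_neg_one_eq_nil (by omega)]
    have : ((PySem.List.max? (bg.map (fun g => (g.length : Int) - 2)) (fun x => x)).getD 0).toNat = 0 := by
      omega
    rw [this]
    show _ ++ ([] : List Int) = _
    rw [List.append_nil]
    rfl
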